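-- pv_equiv track=rewrite | github.com/Tnovyloo/OtoMoto-Price-Search | Program modules/Testing modules folder/test.py | get_more_data
-- ===== SOURCE A (Python) =====
-- def get_more_data(data):
--     result = {'Marka pojazdu' : '',
--             'Model pojazdu' : '',
--             'Rok produkcji' : '',
--             'Wersja' : '',
--             'Moc' : '',
--             'Liczba drzwi' : '',
--             'Rodzaj paliwa' : '',
--             'Pojemność skokowa' : '',
--             'Skrzynia biegów' : '',
--             'Typ nadwozia' : '',
--             'Kolor' : ''}
--
--     for element, answer in list(data):
--         if element in result:
--             result[element] = answer
--
--     return result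
-- ===== SOURCE B (Python) =====
-- KNOWN_FIELDS = ('Marka pojazdu', 'Model pojazdu', 'Rok produkcji', 'Wersja', 'Moc',
--                 'Liczba drzwi', 'Rodzaj paliwa', 'Pojemno\u015b\u0107 skokowa',
--                 'Skrzynia bieg\u00f3w', 'Typ nadwozia', 'Kolor')
--
-- def get_more_data(data):
--     pairs = list(data)
--     lookup = dict(pairs)
--     return {key: (lookup[key] if key in lookup else '') for key in KNOWN_FIELDS}
-- ===== Notes on version B (the rewrite author's own statement) =====
-- stated objective: idiomatic
-- what changed: B builds a dict index of the input once and then maps over the fixed list of known field names looking each up (defaulting to ''), instead of scanning the data and membership-testing each pair against a prefilled result dict.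
import Mathlib
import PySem

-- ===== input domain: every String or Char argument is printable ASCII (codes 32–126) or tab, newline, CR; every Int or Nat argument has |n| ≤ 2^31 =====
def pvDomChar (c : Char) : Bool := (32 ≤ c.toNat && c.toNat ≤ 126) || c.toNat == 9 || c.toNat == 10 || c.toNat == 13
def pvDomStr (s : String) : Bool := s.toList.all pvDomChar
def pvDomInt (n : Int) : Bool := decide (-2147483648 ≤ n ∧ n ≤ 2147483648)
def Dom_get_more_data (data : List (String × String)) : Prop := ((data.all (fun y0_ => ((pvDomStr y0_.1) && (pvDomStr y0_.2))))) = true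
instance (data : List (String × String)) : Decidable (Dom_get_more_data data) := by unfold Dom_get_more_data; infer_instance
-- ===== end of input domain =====

-- B is an idiomatic re-implementation: one dict index of the input, then a map over the fixed field names with a defaulting lookup.

-- ===== PORT A =====
-- A's initial result dict, written as its literal key/value list
def gmdDefaults : List (String × String) :=
  [("Marka pojazdu", ""), ("Model pojazdu", ""), ("Rok produkcji", ""), ("Wersja", ""),
   ("Moc", ""), ("Liczba drzwi", ""), ("Rodzaj paliwa", ""), ("Pojemność skokowa", ""),
   ("Skrzynia biegów", ""), ("Typ nadwozia", ""), ("Kolor", "")]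

def get_more_data (data : List (String × String)) : List (String × String) :=
  let result := PySem.Dict.ofList gmdDefaults
  (data.foldl (fun r p => if r.contains p.1 then r.insert p.1 p.2 else r) result).items

-- ===== PORT B =====
def gmdKnownFields : List String :=
  ["Marka pojazdu", "Model pojazdu", "Rok produkcji", "Wersja", "Moc",
   "Liczba drzwi", "Rodzaj paliwa", "Pojemność skokowa",
   "Skrzynia biegów", "Typ nadwozia", "Kolor"]

def get_more_data_alt (data : List (String × String)) : List (String × String) :=
  let lookup := PySem.Dict.ofList data
  gmdKnownFields.map (fun key => (key, if lookup.contains key then lookup.getD key "" else ""))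

-- ===== PRECONDITION & SPEC =====
def Spec_get_more_data (data : List (String × String)) (out : List (String × String)) : Prop := out = get_more_data_alt data
instance (data : List (String × String)) (out : List (String × String)) : Decidable (Spec_get_more_data data out) := by unfold Spec_get_more_data; infer_instance

-- ===== CLAIM (what is proved, stated in full; the proofs are below) =====
def Claim_equal_get_more_data : Prop := ∀ (data : List (String × String)), Dom_get_more_data data → Spec_get_more_data data (get_more_data data)

-- ===== LEMMAS AND PROOFS =====

-- A's loop step
def gmdStep (r : PySem.Dict String String) (p : String × String) : PySem.Dict String String :=
  if r.contains p.1 then r.insert p.1 p.2 else r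

theorem gmd_keys_fold (l : List (String × String)) (d : PySem.Dict String String) :
    (l.foldl gmdStep d).keys = d.keys := by
  induction l generalizing d with
  | nil => rfl
  | cons p l ih =>
      simp only [List.foldl_cons]
      rw [ih]
      unfold gmdStep
      split
      · exact PySem.Dict.keys_insert_of_contains _ _ (by assumption)
      · rfl

-- lookup after folding plain inserts from any start: last value in l wins, else the start's value
theorem gmd_get_foldl_insert (l : List (String × String)) (d : PySem.Dict String String) (k : String) :
    (l.foldl (fun r p => r.insert p.1 p.2) d).get? k =
      ((PySem.Dict.ofList l).get? k).or (d.get? k) := by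
  induction l generalizing d with
  | nil =>
      show d.get? k = ((PySem.Dict.empty).get? k).or (d.get? k)
      rw [PySem.Dict.get?_empty, Option.none_or]
  | cons p l ih =>
      simp only [List.foldl_cons]
      rw [ih]
      have hr : (PySem.Dict.ofList (p :: l)).get? k =
          ((PySem.Dict.ofList l).get? k).or ((PySem.Dict.empty.insert p.1 p.2).get? k) := by
        show ((l.foldl (fun r q => r.insert q.1 q.2) (PySem.Dict.empty.insert p.1 p.2)).get? k) = _
        rw [ih]
      rw [hr]
      cases h : (PySem.Dict.ofList l).get? k with
      | some v => simp [Option.some_or]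
      | none =>
          simp only [Option.none_or]
          by_cases hk : k = p.1
          · subst hk
            rw [PySem.Dict.get?_insert_self, PySem.Dict.get?_insert_self, Option.some_or]
          · rw [PySem.Dict.get?_insert_of_ne _ _ hk, PySem.Dict.get?_insert_of_ne _ _ hk,
                PySem.Dict.get?_empty, Option.none_or]

-- lookup after A's guarded fold, for a key already present in the start dict
theorem gmd_get_fold (l : List (String × String)) (d : PySem.Dict String String) (k : String)
    (hk : d.contains k = true) :
    (l.foldl gmdStep d).get? k = ((PySem.Dict.ofList l).get? k).or (d.get? k) := by
  induction l generalizing d with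
  | nil =>
      show d.get? k = ((PySem.Dict.empty).get? k).or (d.get? k)
      rw [PySem.Dict.get?_empty, Option.none_or]
  | cons p l ih =>
      simp only [List.foldl_cons]
      have hr : (PySem.Dict.ofList (p :: l)).get? k =
          ((PySem.Dict.ofList l).get? k).or ((PySem.Dict.empty.insert p.1 p.2).get? k) := by
        have := gmd_get_foldl_insert l (PySem.Dict.empty.insert p.1 p.2) k
        exact this
      rw [hr]
      by_cases hc : d.contains p.1 = true
      · have hstep : gmdStep d p = d.insert p.1 p.2 := by unfold gmdStep; simp [hc]
        rw [hstep, ih (d.insert p.1 p.2) (by rw [PySem.Dict.contains_insert]; simp [hk])]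
        cases h : (PySem.Dict.ofList l).get? k with
        | some v => simp [Option.some_or]
        | none =>
            simp only [Option.none_or]
            by_cases hke : k = p.1
            · subst hke
              rw [PySem.Dict.get?_insert_self, PySem.Dict.get?_insert_self, Option.some_or]
            · rw [PySem.Dict.get?_insert_of_ne _ _ hke, PySem.Dict.get?_insert_of_ne _ _ hke,
                  PySem.Dict.get?_empty, Option.none_or]
      · have hstep : gmdStep d p = d := by unfold gmdStep; simp [hc]
        rw [hstep, ih d hk]
        cases h : (PySem.Dict.ofList l).get? k with
        | some v => simp [Option.some_or]
        | none =>
            simp only [Option.none_or]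
            by_cases hke : k = p.1
            · subst hke; exact absurd hk (by simpa using hc)
            · rw [PySem.Dict.get?_insert_of_ne _ _ hke, PySem.Dict.get?_empty, Option.none_or]

theorem gmd_defaults_keys : (PySem.Dict.ofList gmdDefaults).keys = gmdKnownFields := by decide

theorem gmd_defaults_get (k : String) (hk : k ∈ gmdKnownFields) :
    (PySem.Dict.ofList gmdDefaults).get? k = some "" := by
  fin_cases hk <;> decide

-- ===== VERDICT (by name: the statement is the Claim_ definition above) =====
theorem get_more_data_spec : Claim_equal_get_more_data := by
  intro data _
  unfold Spec_get_more_data get_more_data get_more_data_alt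
  simp only []
  have hkeys : (data.foldl gmdStep (PySem.Dict.ofList gmdDefaults)).keys = gmdKnownFields := by
    rw [gmd_keys_fold, gmd_defaults_keys]
  have hnd : (data.foldl gmdStep (PySem.Dict.ofList gmdDefaults)).keys.Nodup := by
    rw [hkeys]; decide
  rw [show (data.foldl (fun r p => if r.contains p.1 then r.insert p.1 p.2 else r)
        (PySem.Dict.ofList gmdDefaults)) = data.foldl gmdStep (PySem.Dict.ofList gmdDefaults) from rfl]
  rw [PySem.Dict.items_eq_map_keys _ hnd ""]
  rw [hkeys]
  apply List.map_congr_left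
  intro k hk
  have hcont : (PySem.Dict.ofList gmdDefaults).contains k = true := by
    rw [PySem.Dict.contains_iff_mem_keys] at *
    · rwa [gmd_defaults_keys]
  have hget := gmd_get_fold data (PySem.Dict.ofList gmdDefaults) k hcont
  rw [PySem.Dict.getD_eq_get?_getD, hget, gmd_defaults_get k hk]
  cases h : (PySem.Dict.ofList data).get? k with
  | some v =>
      have hc : (PySem.Dict.ofList data).contains k = true := by
        rw [PySem.Dict.contains_eq_isSome_get?, h]; rfl
      simp [hc, PySem.Dict.getD_eq_get?_getD, h, Option.or]
  | none =>
      have hc : (PySem.Dict.ofList data).contains k = false := by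
        rw [PySem.Dict.contains_eq_isSome_get?, h]; rfl
      simp [hc, Option.or]
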